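-- pv_equiv track=rewrite | github.com/aibryanov/avito_task | preprop_utils.py | build_target
-- ===== SOURCE A (Python) =====
-- from typing import List, Tuple
--
-- def build_target(text: str) -> Tuple[str, List[int]]:
--     """
--     Строит вектор таргета и текст без пробелов
--
--         text: текст с пробелами
--
--         return: текст без пробелов, вектор таргета
--     """
--     words = text.split()
--     clean_text = "".join(words)
--     labels = []
--
--     for word in words:
--         if not word:
--             continue
--         # последний = 1
--         labels.extend([0] * (len(word) - 1))
--         labels.append(1)
--
--     if labels:
--         labels[-1] = 0
--
--     return clean_text, labels
-- ===== SOURCE B (Python) =====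
-- from typing import List, Tuple
--
-- def build_target(text: str) -> Tuple[str, List[int]]:
--     words = text.split()
--     clean_text = "".join(words)
--     boundaries = set()
--     pos = 0
--     for word in words[:-1]:
--         pos += len(word)
--         boundaries.add(pos - 1)
--     labels = [1 if i in boundaries else 0 for i in range(len(clean_text))]
--     return clean_text, labels
-- ===== Notes on version B (the rewrite author's own statement) =====
-- stated objective: alternative
-- what changed: A accumulates labels word by word with extend/append and then overwrites labels[-1]; B instead builds a set of word-boundary character positions in one pass over words[:-1] and emits the label vector as a range comprehension, with no final fixup.
import Mathlib
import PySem

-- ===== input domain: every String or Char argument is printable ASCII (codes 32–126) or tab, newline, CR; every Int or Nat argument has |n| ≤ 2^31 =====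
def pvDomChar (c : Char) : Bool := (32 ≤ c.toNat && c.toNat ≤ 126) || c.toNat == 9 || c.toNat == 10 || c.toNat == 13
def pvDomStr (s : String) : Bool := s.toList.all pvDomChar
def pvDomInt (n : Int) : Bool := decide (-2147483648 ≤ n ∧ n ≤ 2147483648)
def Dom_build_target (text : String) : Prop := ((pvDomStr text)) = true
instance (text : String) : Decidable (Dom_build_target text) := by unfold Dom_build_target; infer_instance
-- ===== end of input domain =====

-- B replaces A's accumulate-then-overwrite labels loop by a boundary-position set built in one
-- pass over words[:-1] plus a range comprehension (objective: alternative decomposition, same cost).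

-- ===== PORT A =====
def build_target (text : String) : String × List Int :=
  let words := PySem.Str.split₀ text
  let clean_text := PySem.Str.join "" words
  let labels : List Int := words.foldl
    (fun labels word =>
      if word = "" then labels
      else (labels ++ PySem.List.pyRepeat [0] (PySem.Str.len word - 1)) ++ [1]) []
  let labels := if labels ≠ [] then PySem.List.pySetD labels (-1) 0 else labels
  (clean_text, labels)

-- ===== PORT B =====
def build_target_alt (text : String) : String × List Int :=
  let words := PySem.Str.split₀ text
  let clean_text := PySem.Str.join "" words
  let st := (PySem.List.slice words none (some (-1))).foldl
    (fun (st : PySem.Set Int × Int) word =>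
      let pos := st.2 + PySem.Str.len word
      (PySem.Set.add st.1 (pos - 1), pos)) (PySem.Set.empty, 0)
  let labels := (PySem.List.pyRange 0 (PySem.Str.len clean_text) 1).map
    (fun i => if PySem.Set.contains st.1 i then (1 : Int) else 0)
  (clean_text, labels)

-- ===== PRECONDITION & SPEC =====
def Spec_build_target (text : String) (out : String × List Int) : Prop := out = build_target_alt text
instance (text : String) (out : String × List Int) : Decidable (Spec_build_target text out) := by unfold Spec_build_target; infer_instance

-- ===== CLAIM (what is proved, stated in full; the proofs are below) =====
def Claim_equal_build_target : Prop := ∀ (text : String), Dom_build_target text → Spec_build_target text (build_target text)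

-- ===== LEMMAS AND PROOFS =====

-- every word produced by str.split() is nonempty
theorem split₀_go_ne_nil (s : List Char) : ∀ (cur : List Char) (acc : List (List Char)),
    (∀ w ∈ acc, w ≠ []) → ∀ w ∈ PySem.Chars.split₀.go s cur acc, w ≠ [] := by
  induction s with
  | nil =>
    intro cur acc hacc w hw
    unfold PySem.Chars.split₀.go at hw
    by_cases hc : cur.isEmpty = true
    · rw [if_pos hc] at hw
      exact hacc w (List.mem_reverse.mp hw)
    · rw [if_neg hc] at hw
      rw [List.mem_reverse, List.mem_cons] at hw
      rcases hw with rfl | h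
      · simp only [List.isEmpty_iff] at hc
        simpa using hc
      · exact hacc w h
  | cons c rest ih =>
    intro cur acc hacc w hw
    unfold PySem.Chars.split₀.go at hw
    by_cases hs : PySem.Chars.isspace c = true
    · rw [if_pos hs] at hw
      by_cases hc : cur.isEmpty = true
      · rw [if_pos hc] at hw
        exact ih [] acc hacc w hw
      · rw [if_neg hc] at hw
        refine ih [] (cur.reverse :: acc) ?_ w hw
        intro v hv
        rw [List.mem_cons] at hv
        rcases hv with rfl | h
        · simp only [List.isEmpty_iff] at hc
          simpa using hc
        · exact hacc v h
    · rw [if_neg hs] at hw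
      exact ih (c :: cur) acc hacc w hw

theorem split₀_ne_empty (t : String) : ∀ w ∈ PySem.Str.split₀ t, w ≠ "" := by
  intro w hw
  simp only [PySem.Str.split₀, List.mem_map] at hw
  obtain ⟨l, hl, rfl⟩ := hw
  have hne : l ≠ [] := split₀_go_ne_nil t.toList [] [] (by simp) l
    (by simpa [PySem.Chars.split₀] using hl)
  intro hcontra
  apply hne
  have := congrArg String.toList hcontra
  simpa using this

theorem pvLen_pos (w : String) (h : w ≠ "") : 1 ≤ PySem.Str.len w := by
  have : w.toList ≠ [] := by
    intro hc; apply h; exact String.toList_inj.mp (by simp [hc])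
  have : 1 ≤ w.toList.length := List.length_pos_iff.mpr this
  simp only [PySem.Str.len]
  exact_mod_cast this

-- boundary positions (as a plain list) produced by B's loop, starting from offset p
def pvBnds (ws : List String) (p : Int) : List Int :=
  match ws with
  | [] => []
  | w :: ws => (p + PySem.Str.len w - 1) :: pvBnds ws (p + PySem.Str.len w)

def pvTot (ws : List String) : Int := (ws.map PySem.Str.len).sum

theorem pvTot_cons (w : String) (ws : List String) :
    pvTot (w :: ws) = PySem.Str.len w + pvTot ws := by
  simp [pvTot]

theorem pvTot_nonneg (ws : List String) (h : ∀ w ∈ ws, w ≠ "") : 0 ≤ pvTot ws := by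
  induction ws with
  | nil => simp [pvTot]
  | cons w ws ih =>
    rw [pvTot_cons]
    have h1 := pvLen_pos w (h w (by simp))
    have h2 := ih (fun v hv => h v (by simp [hv]))
    omega

theorem pvBnds_mem_bounds (ws : List String) (hne : ∀ w ∈ ws, w ≠ "") :
    ∀ (p : Int), ∀ i ∈ pvBnds ws p, p ≤ i ∧ i ≤ p + pvTot ws - 1 := by
  induction ws with
  | nil => intro p i hi; simp [pvBnds] at hi
  | cons w ws ih =>
    intro p i hi
    have hlw := pvLen_pos w (hne w (by simp))
    have htot := pvTot_nonneg ws (fun v hv => hne v (by simp [hv]))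
    rw [pvTot_cons]
    simp only [pvBnds, List.mem_cons] at hi
    rcases hi with rfl | hi
    · omega
    · have := ih (fun v hv => hne v (by simp [hv])) (p + PySem.Str.len w) i hi
      omega

-- B's fold: membership in the accumulated set
theorem pvFold_mem (ws : List String) : ∀ (s : PySem.Set Int) (p i : Int),
    (i ∈ (ws.foldl (fun (st : PySem.Set Int × Int) word =>
        (PySem.Set.add st.1 (st.2 + PySem.Str.len word - 1), st.2 + PySem.Str.len word))
        (s, p)).1) ↔ (i ∈ s ∨ i ∈ pvBnds ws p) := by
  induction ws with
  | nil => intro s p i; simp [pvBnds]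
  | cons w ws ih =>
    intro s p i
    simp only [List.foldl_cons, ih, PySem.Set.mem_add, pvBnds, List.mem_cons]
    tauto

-- last boundary split off
theorem pvBnds_dropLast (ws : List String) (h : ws ≠ []) :
    ∀ p, pvBnds ws p = pvBnds ws.dropLast p ++ [p + pvTot ws - 1] := by
  induction ws with
  | nil => exact absurd rfl h
  | cons w ws ih =>
    intro p
    cases ws with
    | nil => simp [pvBnds, pvTot]
    | cons y ys =>
      have hrec := ih (by simp) (p + PySem.Str.len w)
      have e1 := pvTot_cons w (y :: ys)
      have e2 : p + PySem.Str.len w + pvTot (y :: ys) - 1 = p + pvTot (w :: y :: ys) - 1 := by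
        omega
      rw [List.dropLast_cons_of_ne_nil (by simp : (y :: ys) ≠ ([] : List String)),
        show pvBnds (w :: y :: ys) p
          = (p + PySem.Str.len w - 1) :: pvBnds (y :: ys) (p + PySem.Str.len w) from rfl,
        show pvBnds (w :: (y :: ys).dropLast) p
          = (p + PySem.Str.len w - 1) :: pvBnds ((y :: ys).dropLast) (p + PySem.Str.len w) from rfl,
        hrec, e2]
      simp

theorem pvTot_dropLast_lt (ws : List String) (h : ws ≠ []) (hne : ∀ w ∈ ws, w ≠ "") :
    pvTot ws.dropLast + 1 ≤ pvTot ws := by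
  induction ws with
  | nil => exact absurd rfl h
  | cons w ws ih =>
    cases ws with
    | nil =>
      have h1 := pvLen_pos w (hne w (by simp))
      have e : pvTot [w] = PySem.Str.len w := by simp [pvTot]
      have e0 : pvTot ([w].dropLast) = 0 := by simp [pvTot]
      omega
    | cons y ys =>
      have := ih (by simp) (fun v hv => hne v (by simp [hv]))
      rw [List.dropLast_cons_of_ne_nil (by simp : (y :: ys) ≠ [])]
      rw [pvTot_cons, pvTot_cons]
      omega

-- the labels with ALL word-final positions marked (no fixup yet)
theorem pvFull (ws : List String) (hne : ∀ w ∈ ws, w ≠ "") : ∀ (p : Int),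
    (PySem.List.pyRange p (p + pvTot ws) 1).map
        (fun i => if i ∈ pvBnds ws p then (1 : Int) else 0)
      = ws.flatMap (fun w => List.replicate ((PySem.Str.len w - 1).toNat) 0 ++ [1]) := by
  induction ws with
  | nil =>
    intro p
    simp [pvTot, PySem.List.pyRange_one_eq_nil (le_refl p)]
  | cons w ws ih =>
    intro p
    have hlw := pvLen_pos w (hne w (by simp))
    have hne' : ∀ v ∈ ws, v ≠ "" := fun v hv => hne v (by simp [hv])
    have htot := pvTot_nonneg ws hne'
    set L := PySem.Str.len w with hL
    have hmid : PySem.List.pyRange (p + L - 1) (p + L) = [p + L - 1] := by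
      have h := PySem.List.pyRange_one_singleton (p + L - 1)
      rw [show (p + L - 1) + 1 = p + L by ring] at h
      exact h
    have hstep1 : PySem.List.pyRange p (p + L + pvTot ws)
        = (PySem.List.pyRange p (p + L - 1) ++ [p + L - 1])
          ++ PySem.List.pyRange (p + L) (p + L + pvTot ws) := by
      rw [PySem.List.pyRange_one_append p (p + L) (p + L + pvTot ws) (by omega) (by omega),
          PySem.List.pyRange_one_append p (p + L - 1) (p + L) (by omega) (by omega), hmid]
    have hzeros : (PySem.List.pyRange p (p + L - 1)).map
        (fun i => if i ∈ pvBnds (w :: ws) p then (1 : Int) else 0)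
        = List.replicate ((L - 1).toNat) 0 := by
      rw [List.map_congr_left (g := fun _ => (0 : Int)) ?_]
      · rw [List.map_const', PySem.List.length_pyRange_one,
          show p + L - 1 - p = L - 1 by ring]
      · intro i hi
        rw [PySem.List.mem_pyRange_one] at hi
        have hnotmem : i ∉ pvBnds (w :: ws) p := by
          intro hmem
          simp only [pvBnds, List.mem_cons] at hmem
          rcases hmem with rfl | hmem
          · omega
          · have := pvBnds_mem_bounds ws hne' (p + PySem.Str.len w) i hmem
            omega
        simp [hnotmem]
    have hone : (List.map (fun i => if i ∈ pvBnds (w :: ws) p then (1 : Int) else 0)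
        [p + L - 1]) = [1] := by
      have hm : (p + L - 1) ∈ pvBnds (w :: ws) p := by
        rw [show pvBnds (w :: ws) p
          = (p + PySem.Str.len w - 1) :: pvBnds ws (p + PySem.Str.len w) from rfl,
          List.mem_cons, ← hL]
        exact Or.inl rfl
      simp [hm]
    have hrest : (PySem.List.pyRange (p + L) (p + L + pvTot ws)).map
        (fun i => if i ∈ pvBnds (w :: ws) p then (1 : Int) else 0)
        = ws.flatMap (fun w => List.replicate ((PySem.Str.len w - 1).toNat) 0 ++ [1]) := by
      rw [List.map_congr_left (g := fun i => if i ∈ pvBnds ws (p + L) then (1 : Int) else 0) ?_]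
      · exact ih hne' (p + L)
      · intro i hi
        rw [PySem.List.mem_pyRange_one] at hi
        have hiff : i ∈ pvBnds (w :: ws) p ↔ i ∈ pvBnds ws (p + L) := by
          rw [show pvBnds (w :: ws) p
            = (p + PySem.Str.len w - 1) :: pvBnds ws (p + PySem.Str.len w) from rfl,
            List.mem_cons, ← hL]
          constructor
          · rintro (h | h)
            · omega
            · exact h
          · exact fun h => Or.inr h
        simp only [hiff]
    rw [pvTot_cons, show p + (L + pvTot ws) = p + L + pvTot ws by ring, hstep1]
    simp only [List.map_append]
    rw [hzeros, hone, hrest]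
    rw [List.flatMap_cons, ← hL]

theorem pvSetD_neg_one (l : List Int) (v : Int) (h : l ≠ []) :
    PySem.List.pySetD l (-1) v = l.dropLast ++ [v] := by
  have hlen : 1 ≤ l.length := List.length_pos_iff.mpr h
  simp only [PySem.List.pySetD, PySem.List.pySet?, PySem.List.pyIdx?]
  rw [if_neg (by omega : ¬ (0 : Int) ≤ -1),
    if_pos (by exact_mod_cast by omega : -(l.length : Int) ≤ -1)]
  simp only [Option.map_some, Option.getD_some]
  have h4 : (-(-1 : Int)).toNat = 1 := rfl
  rw [h4, List.set_eq_take_append_cons_drop, if_pos (by omega)]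
  rw [← List.dropLast_eq_take]
  have h5 : l.length - 1 + 1 = l.length := by omega
  rw [h5, List.drop_length]

theorem pvSlice_neg_one (ws : List String) :
    PySem.List.slice ws none (some (-1)) = ws.dropLast := by
  simp [PySem.List.slice, List.dropLast_eq_take]

theorem pvIntersperse_nil_flatten {α : Type} (L : List (List α)) :
    (L.intersperse ([] : List α)).flatten = L.flatten := by
  induction L with
  | nil => rfl
  | cons x L ih =>
    cases L with
    | nil => rfl
    | cons y L =>
      rw [show (x :: y :: L).intersperse ([] : List α)
        = x :: ([] : List α) :: ((y :: L).intersperse ([] : List α)) from rfl]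
      simp only [List.flatten_cons] at ih ⊢
      simp [ih]

theorem pvClean_len (ws : List String) : PySem.Str.len (PySem.Str.join "" ws) = pvTot ws := by
  simp only [PySem.Str.len, PySem.Str.toList_join]
  have hj : PySem.Chars.join "".toList (ws.map String.toList) = (ws.map String.toList).flatten := by
    show List.intercalate _ _ = _
    rw [show "".toList = ([] : List Char) from rfl, List.intercalate, pvIntersperse_nil_flatten]
  rw [hj, List.length_flatten]
  rw [Nat.cast_list_sum]
  simp only [pvTot, List.map_map, List.map_map]
  congr 1

-- ===== VERDICT (by name: the statement is the Claim_ definition above) =====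
theorem build_target_spec : Claim_equal_build_target := by
  intro text _
  unfold Spec_build_target
  simp only [build_target, build_target_alt]
  have hne := split₀_ne_empty text
  set ws := PySem.Str.split₀ text with hws
  -- A's loop is the flatMap of per-word chunks
  have hA : ws.foldl
      (fun labels word =>
        if word = "" then labels
        else (labels ++ PySem.List.pyRepeat [0] (PySem.Str.len word - 1)) ++ [1])
      ([] : List Int)
      = ws.flatMap (fun w => List.replicate ((PySem.Str.len w - 1).toNat) (0 : Int) ++ [1]) := by
    rw [PySem.List.foldl_congr_mem ws _
      (fun labels word => labels ++ (List.replicate ((PySem.Str.len word - 1).toNat) (0 : Int) ++ [1]))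
      ([] : List Int) ?_]
    · rw [PySem.List.foldl_append_eq_flatMap]
      simp
    · intro acc x hx
      rw [if_neg (hne x hx), PySem.List.pyRepeat_singleton, List.append_assoc]
  -- B's membership set is pvBnds of dropLast
  have hB : ∀ i : Int, PySem.Set.contains
      ((PySem.List.slice ws none (some (-1))).foldl
        (fun (st : PySem.Set Int × Int) word =>
          (PySem.Set.add st.1 (st.2 + PySem.Str.len word - 1), st.2 + PySem.Str.len word))
        (PySem.Set.empty, 0)).1 i = true
      ↔ i ∈ pvBnds ws.dropLast 0 := by
    intro i
    rw [pvSlice_neg_one]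
    constructor
    · intro h
      have hm : i ∈ (ws.dropLast.foldl (fun (st : PySem.Set Int × Int) word =>
          (PySem.Set.add st.1 (st.2 + PySem.Str.len word - 1), st.2 + PySem.Str.len word))
          (PySem.Set.empty, 0)).1 := by
        simpa [PySem.Set.contains] using h
      have := (pvFold_mem ws.dropLast PySem.Set.empty 0 i).mp hm
      simpa [PySem.Set.empty] using this
    · intro h
      have hm := (pvFold_mem ws.dropLast PySem.Set.empty 0 i).mpr (Or.inr h)
      simpa [PySem.Set.contains] using hm
  rw [pvClean_len]
  simp only [hA]
  by_cases hnil : ws = []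
  · rw [hnil]
    simp [pvTot, PySem.List.pyRange_one_eq_nil (le_refl (0 : Int))]
  · -- nonempty case
    have htot1 : 1 ≤ pvTot ws := by
      cases hcs : ws with
      | nil => exact absurd hcs hnil
      | cons w ws' =>
        have h1 := pvLen_pos w (hne w (by rw [hcs]; simp))
        have h2 := pvTot_nonneg ws' (fun v hv => hne v (by rw [hcs]; simp [hv]))
        rw [pvTot_cons]; omega
    have hfull := pvFull ws hne 0
    rw [zero_add] at hfull
    set labFull := (PySem.List.pyRange 0 (pvTot ws)).map
      (fun i => if i ∈ pvBnds ws 0 then (1 : Int) else 0) with hlabFull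
    simp only [← hfull]
    have hlabne : labFull ≠ [] := by
      intro hc
      have := congrArg List.length hc
      simp only [hlabFull, List.length_map, PySem.List.length_pyRange_one, List.length_nil] at this
      omega
    rw [if_pos hlabne, pvSetD_neg_one _ _ hlabne]
    -- split the range at pvTot ws - 1
    have hsplit : PySem.List.pyRange (0 : Int) (pvTot ws)
        = PySem.List.pyRange 0 (pvTot ws - 1) ++ [pvTot ws - 1] := by
      have h := PySem.List.pyRange_one_succ_right (a := 0) (b := pvTot ws - 1) (by omega)
      rw [show pvTot ws - 1 + 1 = pvTot ws by ring] at h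
      exact h
    have hbnds := pvBnds_dropLast ws hnil 0
    rw [zero_add] at hbnds
    have hdropbound : ∀ i ∈ pvBnds ws.dropLast 0, i < pvTot ws - 1 := by
      intro i hi
      have h1 := pvBnds_mem_bounds ws.dropLast
        (fun v hv => hne v (List.dropLast_subset ws hv)) 0 i hi
      have h2 := pvTot_dropLast_lt ws hnil hne
      omega
    have hLHS : labFull.dropLast
        = (PySem.List.pyRange 0 (pvTot ws - 1)).map
            (fun i => if i ∈ pvBnds ws 0 then (1 : Int) else 0) := by
      rw [hlabFull, hsplit, List.map_append]
      simp
    have hRHS : (PySem.List.pyRange 0 (pvTot ws)).map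
        (fun i => if i ∈ pvBnds ws.dropLast 0 then (1 : Int) else 0)
        = (PySem.List.pyRange 0 (pvTot ws - 1)).map
            (fun i => if i ∈ pvBnds ws 0 then (1 : Int) else 0) ++ [0] := by
      rw [hsplit, List.map_append]
      congr 1
      · apply List.map_congr_left
        intro i hi
        rw [PySem.List.mem_pyRange_one] at hi
        have hiff : i ∈ pvBnds ws.dropLast 0 ↔ i ∈ pvBnds ws 0 := by
          rw [hbnds, List.mem_append]
          simp only [List.mem_singleton]
          constructor
          · exact fun h => Or.inl h
          · rintro (h | h)
            · exact h
            · omega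
        simp only [hiff]
      · have hnm : (pvTot ws - 1) ∉ pvBnds ws.dropLast 0 := by
          intro hc; exact absurd (hdropbound _ hc) (by omega)
        simp [hnm]
    congr 1
    rw [List.map_congr_left (g := fun i => if i ∈ pvBnds ws.dropLast 0 then (1 : Int) else 0)
      (by intro i _
          have hc := propext (hB i)
          simp only [hc])]
    rw [hRHS, ← hLHS]
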